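-- pv_equiv track=rewrite | github.com/jakedebellisbis/ff-draft-tool | backend/app/services.py | snake_picks
-- ===== SOURCE A (Python) =====
-- from typing import List, Tuple
--
-- def snake_picks(num_teams:int, draft_slot:int, num_rounds:int) -> List[int]:
--     picks = []
--     for r in range(1, num_rounds+1):
--         if r % 2 == 1:
--             overall = (r-1)*num_teams + draft_slot
--         else:
--             overall = r*num_teams - (draft_slot-1)
--         picks.append(overall)
--     return picks
-- ===== SOURCE B (Python) =====
-- def snake_picks(num_teams: int, draft_slot: int, num_rounds: int):
--     # Difference-sequence generation: start at the round-1 pick and repeatedly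
--     # add the two alternating gaps of the snake pattern.
--     if num_rounds <= 0:
--         return []
--     picks = [draft_slot]
--     deltas = (2 * (num_teams - draft_slot) + 1, 2 * draft_slot - 1)
--     for i in range(num_rounds - 1):
--         picks.append(picks[-1] + deltas[i % 2])
--     return picks
-- ===== Notes on version B (the rewrite author's own statement) =====
-- stated objective: alternative
-- what changed: B generates the picks as a difference sequence: it seeds with the round-1 pick draft_slot and repeatedly adds the two alternating snake gaps (2*(num_teams-draft_slot)+1 and 2*draft_slot-1) to the previous pick, instead of A's per-round closed-form formula with a parity branch.
import Mathlib
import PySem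

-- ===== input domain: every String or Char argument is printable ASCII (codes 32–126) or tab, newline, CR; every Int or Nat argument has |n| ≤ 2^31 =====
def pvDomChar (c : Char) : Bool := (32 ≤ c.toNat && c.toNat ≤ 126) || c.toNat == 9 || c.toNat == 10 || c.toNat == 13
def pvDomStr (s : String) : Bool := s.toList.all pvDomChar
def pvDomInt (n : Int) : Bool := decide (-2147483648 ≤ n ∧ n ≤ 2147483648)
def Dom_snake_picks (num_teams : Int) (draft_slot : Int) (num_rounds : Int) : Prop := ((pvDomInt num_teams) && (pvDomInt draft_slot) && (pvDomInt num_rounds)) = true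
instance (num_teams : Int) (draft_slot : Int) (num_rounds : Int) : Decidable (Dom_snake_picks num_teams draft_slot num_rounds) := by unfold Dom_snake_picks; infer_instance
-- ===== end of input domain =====

-- B replaces A's per-round closed-form formula (with a parity branch) by difference-sequence
-- generation: seed with the round-1 pick and repeatedly add the two alternating snake gaps;
-- objective: alternative algorithm, same cost.

-- ===== PORT A =====
-- for r in range(1, num_rounds+1): append (r-1)*num_teams+draft_slot if r odd else r*num_teams-(draft_slot-1)
def snake_picks (num_teams : Int) (draft_slot : Int) (num_rounds : Int) : List Int :=
  (PySem.List.pyRange 1 (num_rounds + 1) 1).foldl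
    (fun picks r =>
      picks ++ [if PySem.Int.mod r 2 == 1 then (r - 1) * num_teams + draft_slot
                else r * num_teams - (draft_slot - 1)]) []

-- ===== PORT B =====
-- Source B's loop `for i in range(num_rounds-1): picks.append(picks[-1] + deltas[i % 2])`
-- as structural recursion on the remaining iteration count: `cur` is picks[-1], and the
-- pair (d0, d1) is swapped each step, which is exactly the deltas[i % 2] selection.
def snakeAltGo (d0 d1 cur : Int) (k : Nat) : List Int :=
  match k with
  | 0 => []
  | k + 1 => (cur + d0) :: snakeAltGo d1 d0 (cur + d0) k

def snake_picks_alt (num_teams : Int) (draft_slot : Int) (num_rounds : Int) : List Int :=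
  if num_rounds ≤ 0 then []
  else
    draft_slot ::
      snakeAltGo (2 * (num_teams - draft_slot) + 1) (2 * draft_slot - 1) draft_slot
        (num_rounds - 1).toNat

-- ===== PRECONDITION & SPEC =====
def Spec_snake_picks (num_teams : Int) (draft_slot : Int) (num_rounds : Int) (out : List Int) : Prop := out = snake_picks_alt num_teams draft_slot num_rounds
instance (num_teams : Int) (draft_slot : Int) (num_rounds : Int) (out : List Int) : Decidable (Spec_snake_picks num_teams draft_slot num_rounds out) := by unfold Spec_snake_picks; infer_instance

-- ===== CLAIM (what is proved, stated in full; the proofs are below) =====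
def Claim_equal_snake_picks : Prop := ∀ (num_teams : Int) (draft_slot : Int) (num_rounds : Int), Dom_snake_picks num_teams draft_slot num_rounds → Spec_snake_picks num_teams draft_slot num_rounds (snake_picks num_teams draft_slot num_rounds)

-- ===== LEMMAS AND PROOFS =====

-- A's append-fold is a map over the range
theorem snake_foldl_map (g : Int → Int) (rs : List Int) (acc : List Int) :
    rs.foldl (fun picks r => picks ++ [g r]) acc = acc ++ rs.map g := by
  induction rs generalizing acc with
  | nil => simp
  | cons r rs ih => simp [List.foldl, ih]

-- A's per-round formula mapped over the rounds after round 2p+1 equals B's delta chain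
-- started from the round-(2p+1) value 2p*T+S.
theorem snake_go_eq (T S : Int) (k : Nat) : ∀ (p : Nat),
    snakeAltGo (2 * (T - S) + 1) (2 * S - 1) (2 * (p : Int) * T + S) k
      = (PySem.List.pyRange (2 * (p : Int) + 2) (2 * (p : Int) + 2 + (k : Int)) 1).map
          (fun r => if PySem.Int.mod r 2 == 1 then (r - 1) * T + S
                    else r * T - (S - 1)) := by
  induction k using Nat.twoStepInduction with
  | zero =>
      intro p
      rw [PySem.List.pyRange_one_eq_nil (by omega)]
      simp [snakeAltGo]
  | one =>
      intro p
      rw [PySem.List.pyRange_one_cons (by omega),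
          PySem.List.pyRange_one_eq_nil (by omega)]
      simp [snakeAltGo, PySem.Int.mod]
      ring
  | more k ih _ =>
      intro p
      rw [PySem.List.pyRange_one_cons (by omega),
          PySem.List.pyRange_one_cons (by omega)]
      have hm1 : PySem.Int.mod (2 * (p : Int) + 2) 2 = 0 := by
        rw [PySem.Int.mod_eq_emod_of_pos (by norm_num)]; omega
      have hm2 : PySem.Int.mod (2 * (p : Int) + 2 + 1) 2 = 1 := by
        rw [PySem.Int.mod_eq_emod_of_pos (by norm_num)]; omega
      have htail := ih (p + 1)
      push_cast at htail
      have h1 : (2 * ((p : Int) + 1) + 2) = 2 * (p : Int) + 2 + 1 + 1 := by ring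
      rw [h1] at htail
      have h2 : (2 * (p : Int) + 2 + 1 + 1 + (k : Int))
          = 2 * (p : Int) + 2 + ((k : Int) + 2) := by ring
      rw [h2] at htail
      have hv1 : 2 * (p : Int) * T + S + (2 * (T - S) + 1) = 2 * ((p : Int) + 1) * T - S + 1 := by ring
      have hv2 : 2 * ((p : Int) + 1) * T - S + 1 + (2 * S - 1) = 2 * ((p : Int) + 1) * T + S := by ring
      show (2 * (p : Int) * T + S + (2 * (T - S) + 1)) ::
            snakeAltGo (2 * S - 1) (2 * (T - S) + 1) (2 * (p : Int) * T + S + (2 * (T - S) + 1)) (k + 1)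
          = _
      rw [hv1, snakeAltGo, hv2]
      have hc : ((k : Int) + 1 + 1) = (k : Int) + 2 := by ring
      rw [show ((k + 2 : Nat) : Int) = (k : Int) + 2 by push_cast; ring]
      rw [List.map_cons, List.map_cons, ← htail]
      refine congrArg₂ List.cons ?_ (congrArg₂ List.cons ?_ ?_)
      · rw [hm1]; simp only [show ((0 : Int) == 1) = false from rfl, Bool.false_eq_true, if_false]; ring
      · rw [hm2]; simp only [show ((1 : Int) == 1) = true from rfl, if_true]; ring
      · have : (2 * ((p : Int) + 1) * T + S) = 2 * (((p + 1 : Nat) : Int)) * T + S := by push_cast; ring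
        rw [this]

-- ===== VERDICT (by name: the statement is the Claim_ definition above) =====
theorem snake_picks_spec : Claim_equal_snake_picks := by
  intro num_teams draft_slot num_rounds _
  show snake_picks num_teams draft_slot num_rounds = snake_picks_alt num_teams draft_slot num_rounds
  unfold snake_picks snake_picks_alt
  rw [snake_foldl_map]
  by_cases h : num_rounds ≤ 0
  · rw [PySem.List.pyRange_one_eq_nil (by omega), if_pos h]
    simp
  · rw [if_neg h, PySem.List.pyRange_one_cons (by omega)]
    have hm : PySem.Int.mod (1 : Int) 2 = 1 := by
      rw [PySem.Int.mod_eq_emod_of_pos (by norm_num)]; decide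
    have hgo := snake_go_eq num_teams draft_slot (num_rounds - 1).toNat 0
    have h0 : (2 * ((0 : Nat) : Int) + 2) = 2 := by norm_num
    rw [h0] at hgo
    have h1 : (2 + (((num_rounds - 1).toNat : Nat) : Int)) = num_rounds + 1 := by omega
    rw [h1] at hgo
    simp only [List.nil_append, List.map_cons]
    rw [hm]
    simp only [show ((1 : Int) == 1) = true from rfl, if_true]
    rw [show (1 : Int) + 1 = 2 from rfl, ← hgo]
    norm_num
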